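-- pv_equiv track=rewrite | github.com/gregoryann/Python-Beginner-Examples | Edabit +1500 Python Challenges/Hard/Imaginary Coding Interview.py | interview
-- ===== SOURCE A (Python) =====
-- def interview(lst, tot):
--
-- 	class Test:
--
-- 		very_easy = 5
-- 		easy = 10
-- 		medium = 15
-- 		hard = 20
--
-- 		def __init__(self, questions):
-- 			self.q = questions
--
-- 		def check_time(self, quid, time):
-- 			if self.q[quid] == 'VE':
-- 				goal = Test.very_easy
-- 			elif self.q[quid] == 'E':
-- 				goal = Test.easy
-- 			elif self.q[quid] == 'M':
-- 				goal = Test.medium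
-- 			else:
-- 				goal = Test.hard
--
-- 			return time <= goal
--
-- 		def check_total(self, time):
-- 			return time <= 120
--
-- 	if len(lst) < 8 or tot > 120:
-- 		return 'disqualified'
-- 	test = Test('VE,VE,E,E,M,M,H,H'.split(','))
--
-- 	for n in range(len(lst)):
-- 		if test.check_time(n, lst[n]) == False:
-- 			return 'disqualified'
--
-- 	if test.check_total(tot) == False:
-- 		return 'disqualified'
-- 	else:
-- 		return 'qualified'
-- ===== SOURCE B (Python) =====
-- def interview(lst, tot):
--     # Thresholds are 5,5,10,10,15,15,20,20: i.e. questions come in PAIRS whose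
--     # shared limit increases arithmetically by 5. Recurse two questions at a
--     # time with the current limit, no per-question table or label dispatch.
--     if len(lst) != 8 or tot > 120:
--         return 'disqualified'
--
--     def ok(rest, limit):
--         if not rest:
--             return True
--         return rest[0] <= limit and rest[1] <= limit and ok(rest[2:], limit + 5)
--
--     return 'qualified' if ok(lst, 5) else 'disqualified'
-- ===== Notes on version B (the rewrite author's own statement) =====
-- stated objective: simpler
-- what changed: Replaces the inner Test class, the per-question if/elif label dispatch and the index loop with early return by a recursion that consumes the questions two at a time against a single limit that increases arithmetically by 5 (no threshold table, no indices), behind a len(lst) != 8 guard.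
import Mathlib
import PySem

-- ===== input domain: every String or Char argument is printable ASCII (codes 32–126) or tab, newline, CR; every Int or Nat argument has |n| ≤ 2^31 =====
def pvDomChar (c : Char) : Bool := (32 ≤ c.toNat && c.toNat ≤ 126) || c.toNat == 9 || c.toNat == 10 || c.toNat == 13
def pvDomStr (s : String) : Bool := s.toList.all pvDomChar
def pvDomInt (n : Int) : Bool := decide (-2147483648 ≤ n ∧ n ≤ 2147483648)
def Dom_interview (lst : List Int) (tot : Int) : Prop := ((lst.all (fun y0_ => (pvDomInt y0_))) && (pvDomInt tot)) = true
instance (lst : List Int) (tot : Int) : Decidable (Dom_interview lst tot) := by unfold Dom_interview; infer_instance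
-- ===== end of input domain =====

-- B replaces the inner Test class, the per-question label dispatch and the index loop by a
-- recursion consuming the questions two at a time against a limit increasing by 5 (objective:
-- simpler); A's IndexError region (lists longer than 8 that pass) is outside Pre_.

-- ===== PORT A =====
-- Test.check_time: self.q[quid] looked up with pyGetD (in range for every index A's loop reaches inside Pre_)
def pvACheckTime (q : List String) (quid : Int) (time : Int) : Bool :=
  let goal : Int :=
    if PySem.List.pyGetD q quid "" = "VE" then 5
    else if PySem.List.pyGetD q quid "" = "E" then 10
    else if PySem.List.pyGetD q quid "" = "M" then 15
    else 20
  time ≤ goal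

-- the for-loop over range(len(lst)) with its early return 'disqualified' (false = early return)
def pvALoop (q : List String) (lst : List Int) : List Int → Bool
  | [] => true
  | n :: ns =>
      if pvACheckTime q n (PySem.List.pyGetD lst n 0) = false then false
      else pvALoop q lst ns

def interview (lst : List Int) (tot : Int) : String :=
  if (lst.length : Int) < 8 ∨ tot > 120 then "disqualified"
  else
    let q := (PySem.Str.split? "VE,VE,E,E,M,M,H,H" ",").getD []
    if pvALoop q lst (PySem.List.pyRange 0 (lst.length : Int) 1) = false then "disqualified"
    else if (decide (tot ≤ 120)) = false then "disqualified"
    else "qualified"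

-- ===== PORT B =====
-- ok(rest, limit): rest[1] is pyGetD (always in range on the even-length lists B reaches);
-- rest[2:] is the slice (a :: rest)[2:] = rest.drop 1
def pvBOk : List Int → Int → Bool
  | [], _ => true
  | [a], limit =>  -- unreachable in B (guard forces length 8): Python's rest[1] raises here
      decide (a ≤ limit) && decide (PySem.List.pyGetD [a] 1 0 ≤ limit)
  | a :: b :: rest, limit =>  -- rest[0] = a, rest[1] = b, rest[2:] = rest
      decide (a ≤ limit) && decide (b ≤ limit) && pvBOk rest (limit + 5)

def interview_alt (lst : List Int) (tot : Int) : String :=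
  if lst.length ≠ 8 ∨ tot > 120 then "disqualified"
  else if pvBOk lst 5 then "qualified"
  else "disqualified"

-- ===== PRECONDITION & SPEC =====
-- Pre_ excludes exactly the inputs where A raises IndexError (self.q[8]): more than 8 questions,
-- tot ≤ 120 and the first eight times within their thresholds; A returns normally everywhere else
-- (B returns "disqualified" there, since the interview does not have exactly 8 questions).
def Pre_interview (lst : List Int) (tot : Int) : Prop :=
  ¬ (lst.length > 8 ∧ tot ≤ 120 ∧
      ((lst.take 8).zip [5, 5, 10, 10, 15, 15, 20, 20]).all (fun p => p.1 ≤ p.2) = true)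
instance (lst : List Int) (tot : Int) : Decidable (Pre_interview lst tot) := by
  unfold Pre_interview; infer_instance

def pvWitness_interview : List Int × Int := ([1, 2, 3, 4, 5, 6, 7, 8], 100)

def Spec_interview (lst : List Int) (tot : Int) (out : String) : Prop := out = interview_alt lst tot
instance (lst : List Int) (tot : Int) (out : String) : Decidable (Spec_interview lst tot out) := by unfold Spec_interview; infer_instance

-- ===== CLAIM (what is proved, stated in full; the proofs are below) =====
def Claim_equal_interview : Prop := ∀ (lst : List Int) (tot : Int), Dom_interview lst tot → Pre_interview lst tot → Spec_interview lst tot (interview lst tot)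

-- ===== LEMMAS AND PROOFS =====
set_option maxHeartbeats 1000000

theorem pv_range8 : PySem.List.pyRange 0 8 1 = [0, 1, 2, 3, 4, 5, 6, 7] := by decide

theorem pv_qsplit : (PySem.Str.split? "VE,VE,E,E,M,M,H,H" ",").getD []
    = ["VE", "VE", "E", "E", "M", "M", "H", "H"] := by decide

theorem pv_main : ∀ (lst : List Int) (tot : Int), Pre_interview lst tot →
    interview lst tot = interview_alt lst tot := by
  intro lst tot hpre
  by_cases htot : tot > 120
  · simp [interview, interview_alt, htot]
  by_cases hlen : lst.length < 8
  · unfold interview interview_alt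
    rw [if_pos (Or.inl (by exact_mod_cast hlen)), if_pos (Or.inl (by omega))]
  rcases lst with _ | ⟨a, _ | ⟨b, _ | ⟨c, _ | ⟨d, _ | ⟨e, _ | ⟨f, _ | ⟨g, _ | ⟨h, rest⟩⟩⟩⟩⟩⟩⟩⟩
  all_goals try (simp at hlen)
  rcases rest with _ | ⟨i, rest⟩
  · -- exactly 8 questions: both sides compute on [a,b,c,d,e,f,g,h]
    simp only [interview, interview_alt, pv_qsplit]
    norm_num [htot]
    rw [pv_range8]
    simp only [pvALoop, pvACheckTime, pvBOk]
    norm_num [PySem.List.pyGetD_ofNat']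
    split_ifs <;> simp_all <;> omega
  · -- more than 8 questions: Pre_ guarantees a failure among the first eight,
    -- so A's loop hits its early return before index 8 and both sides are "disqualified"
    have hfail : ¬ (a ≤ 5 ∧ b ≤ 5 ∧ c ≤ 10 ∧ d ≤ 10 ∧ e ≤ 15 ∧ f ≤ 15 ∧ g ≤ 20 ∧ h ≤ 20) := by
      intro hall
      apply hpre
      refine ⟨by simp, by omega, ?_⟩
      simp [List.take, List.zip, hall.1, hall.2.1, hall.2.2.1, hall.2.2.2.1,
        hall.2.2.2.2.1, hall.2.2.2.2.2.1, hall.2.2.2.2.2.2.1, hall.2.2.2.2.2.2.2]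
    have hrange : PySem.List.pyRange 0 (9 + (rest.length : Int)) 1
        = [0, 1, 2, 3, 4, 5, 6, 7] ++ PySem.List.pyRange 8 (9 + (rest.length : Int)) 1 := by
      rw [PySem.List.pyRange_one_append 0 8 (9 + (rest.length : Int)) (by omega) (by omega),
        pv_range8]
    have hloop : pvALoop ["VE", "VE", "E", "E", "M", "M", "H", "H"]
        (a :: b :: c :: d :: e :: f :: g :: h :: i :: rest)
        (PySem.List.pyRange 0 (9 + (rest.length : Int)) 1) = false := by
      rw [hrange]
      simp only [List.cons_append, List.nil_append, pvALoop, pvACheckTime]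
      norm_num [PySem.List.pyGetD_ofNat']
      split_ifs <;> simp_all
    simp only [interview, interview_alt, pv_qsplit]
    rw [show (((a :: b :: c :: d :: e :: f :: g :: h :: i :: rest).length : Int))
          = 9 + (rest.length : Int) from by simp; omega]
    rw [hloop]
    simp

-- ===== VERDICT (by name: the statement is the Claim_ definition above) =====
theorem interview_spec : Claim_equal_interview := by
  intro lst tot _ hpre
  exact pv_main lst tot hpre
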